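-- pv_equiv track=rewrite | github.com/miliar/Code_Jam_Webscraper | solutions_python/solutions_year16_round1_nr1/918.py | solve_case
-- ===== SOURCE A (Python) =====
-- def solve_case(S):
--     revfront = [S[0]]
--     back = []
--     for c in S[1:]:
--         if c >= revfront[-1]:
--             revfront.append(c)
--         else:
--             back.append(c)
--     revfront.reverse()
--     return ''.join(revfront + back)
-- ===== SOURCE B (Python) =====
-- def solve_case(S):
--     # A character belongs to the front chain exactly when it equals the running
--     # maximum of the prefix ending at it; compute prefix maxima once, then
--     # partition by that equality, reverse the front part and append the rest.
--     peaks = []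
--     m = S[0]
--     for c in S:
--         m = m if m > c else c
--         peaks.append(m)
--     front = [c for c, p in zip(S, peaks) if c == p]
--     back = [c for c, p in zip(S, peaks) if c != p]
--     return ''.join(reversed(front)) + ''.join(back)
-- ===== Notes on version B (the rewrite author's own statement) =====
-- stated objective: alternative
-- what changed: Replaces A's single-pass greedy with two mutable front/back lists by a staged prefix-maximum computation: a character goes to the front exactly when it equals the running maximum of its prefix, so B builds the peaks list once and then partitions the string by equality with it, with no greedy state threading through the partition.
import Mathlib
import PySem

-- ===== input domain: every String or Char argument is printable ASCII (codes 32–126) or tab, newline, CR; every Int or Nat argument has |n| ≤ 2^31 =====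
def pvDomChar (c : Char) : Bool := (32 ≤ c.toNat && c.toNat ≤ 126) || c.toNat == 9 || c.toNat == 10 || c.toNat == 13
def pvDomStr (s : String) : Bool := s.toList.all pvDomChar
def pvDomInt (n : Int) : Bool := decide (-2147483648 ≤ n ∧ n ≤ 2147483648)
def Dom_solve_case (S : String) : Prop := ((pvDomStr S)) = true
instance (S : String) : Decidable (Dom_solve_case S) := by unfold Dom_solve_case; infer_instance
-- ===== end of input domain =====

-- B replaces A's one-pass greedy (front/back lists threaded through the loop) by a
-- staged prefix-maximum computation and a partition by equality with it (objective:
-- alternative). Return-value equivalence on nonempty S.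

-- ===== PORT A =====
-- the loop over S[1:] with state (revfront, back); revfront is always nonempty,
-- so revfront[-1] is its last element (getLastD never uses its default here)
def solveLoopA : List Char → List Char → List Char → List Char × List Char
  | [], rf, bk => (rf, bk)
  | c :: rest, rf, bk =>
    if rf.getLastD ' ' ≤ c then solveLoopA rest (rf ++ [c]) bk
    else solveLoopA rest rf (bk ++ [c])

def solve_case (S : String) : String :=
  match S.toList with
  | [] => ""   -- S[0] raises IndexError in Python; excluded by Pre_solve_case
  | c0 :: rest =>
    let p := solveLoopA rest [c0] []
    String.mk (p.1.reverse ++ p.2)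

-- ===== PORT B =====
-- the running-maximum scan building peaks (m updated then appended, as in Source B)
def peaksLoop : List Char → Char → List Char
  | [], _ => []
  | c :: rest, m =>
    let m' := if m > c then m else c
    m' :: peaksLoop rest m'

def solve_case_alt (S : String) : String :=
  match S.toList with
  | [] => ""   -- S[0] raises IndexError in Python; excluded by Pre_solve_case
  | c0 :: _ =>
    let l := S.toList
    let peaks := peaksLoop l c0
    let pairs := l.zip peaks
    let front := (pairs.filter (fun cp => cp.1 == cp.2)).map Prod.fst
    let back := (pairs.filter (fun cp => !(cp.1 == cp.2))).map Prod.fst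
    String.mk (front.reverse ++ back)

-- ===== PRECONDITION & SPEC =====
-- Pre_ excludes only the empty string, on which A's S[0] raises IndexError.
def Pre_solve_case (S : String) : Prop := S ≠ ""
instance (S : String) : Decidable (Pre_solve_case S) := by unfold Pre_solve_case; infer_instance
def pvWitness_solve_case : String := "ba"

def Spec_solve_case (S : String) (out : String) : Prop := out = solve_case_alt S
instance (S : String) (out : String) : Decidable (Spec_solve_case S out) := by unfold Spec_solve_case; infer_instance

-- ===== CLAIM =====
def Claim_equal_solve_case : Prop := ∀ (S : String), Dom_solve_case S → Pre_solve_case S → Spec_solve_case S (solve_case S)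

-- ===== LEMMAS AND PROOFS =====

-- the characters A routes to the front (resp. back), extracted from its loop,
-- parametrised by the current threshold m (= last kept char)
def frontPart : List Char → Char → List Char
  | [], _ => []
  | c :: rest, m => if m ≤ c then c :: frontPart rest c else frontPart rest m

def backPart : List Char → Char → List Char
  | [], _ => []
  | c :: rest, m => if m ≤ c then backPart rest c else c :: backPart rest m

lemma loopA_eq : ∀ (l rf bk : List Char) (m : Char), rf.getLastD ' ' = m →
    solveLoopA l rf bk = (rf ++ frontPart l m, bk ++ backPart l m) := by
  intro l
  induction l with
  | nil => intro rf bk m _; simp [solveLoopA, frontPart, backPart]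
  | cons c rest ih =>
    intro rf bk m hm
    simp only [solveLoopA, frontPart, backPart, hm]
    split_ifs with hc
    · have := ih (rf ++ [c]) bk c (by simp)
      simp [this, List.append_assoc]
    · have := ih rf (bk ++ [c]) m hm
      simp [this, List.append_assoc]

lemma zip_front : ∀ (l : List Char) (m : Char),
    (((List.zipWith Prod.mk l (peaksLoop l m)).filter) (fun cp => cp.1 == cp.2)).map Prod.fst
      = frontPart l m := by
  intro l
  induction l with
  | nil => intro m; simp [peaksLoop, frontPart]
  | cons c rest ih =>
    intro m
    simp only [peaksLoop, frontPart]
    by_cases hc : m ≤ c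
    · have hnot : ¬ m > c := not_lt.mpr hc
      simp [hnot, ih]
    · have hgt : m > c := lt_of_not_ge hc
      have hne : (c == m) = false := by
        simp [beq_eq_false_iff_ne]
        exact ne_of_lt hgt
      simp [hgt, hne, hc, ih]

lemma zip_back : ∀ (l : List Char) (m : Char),
    (((List.zipWith Prod.mk l (peaksLoop l m)).filter) (fun cp => !(cp.1 == cp.2))).map Prod.fst
      = backPart l m := by
  intro l
  induction l with
  | nil => intro m; simp [peaksLoop, backPart]
  | cons c rest ih =>
    intro m
    simp only [peaksLoop, backPart]
    by_cases hc : m ≤ c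
    · have hnot : ¬ m > c := not_lt.mpr hc
      simp [hnot, hc, ih]
    · have hgt : m > c := lt_of_not_ge hc
      have hne : (c == m) = false := by
        simp [beq_eq_false_iff_ne]
        exact ne_of_lt hgt
      simp [hgt, hne, hc, ih]

-- ===== VERDICT =====
theorem solve_case_spec : Claim_equal_solve_case := by
  intro S _ _
  unfold Spec_solve_case solve_case solve_case_alt
  cases h : S.toList with
  | nil => rfl
  | cons c0 rest =>
    have hA := loopA_eq rest [c0] [] c0 (by simp)
    have hp : peaksLoop (c0 :: rest) c0 = c0 :: peaksLoop rest c0 := by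
      simp [peaksLoop]
    simp only [hA, hp]
    simp [List.zip, zip_front, zip_back]
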